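-- pv_equiv track=rewrite | github.com/380758137/accio2api | src/services/stream_service.py | parse_kv_cookie_value
-- ===== SOURCE A (Python) =====
-- def parse_kv_cookie_value(raw_value: str) -> dict[str, str]:
--     """解析 cookie 中的 key=value&key2=value2 结构。作者：liusheng，时间：2026-04-03"""
--
--     result: dict[str, str] = {}
--     for item in raw_value.split("&"):
--         if "=" not in item:
--             continue
--         key, value = item.split("=", 1)
--         if key:
--             result[key] = value
--     return result
-- ===== SOURCE B (Python) =====
-- def parse_kv_cookie_value(raw_value: str) -> dict[str, str]:
--     """Single left-to-right character scan (state machine) instead of split+split."""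
--     result: dict[str, str] = {}
--     key = ""
--     val = ""
--     in_value = False
--     for ch in raw_value:
--         if ch == "&":
--             if in_value and key:
--                 result[key] = val
--             key, val, in_value = "", "", False
--         elif ch == "=" and not in_value:
--             in_value = True
--         elif in_value:
--             val += ch
--         else:
--             key += ch
--     if in_value and key:
--         result[key] = val
--     return result
-- ===== Notes on version B (the rewrite author's own statement) =====
-- stated objective: alternative
-- what changed: Replaces A's pipeline (split on the ampersand separator, then split each item at the first equals sign and branch) with a single left-to-right character scan: a small state machine with key/value accumulators and an in_value flag that commits a pair at each separator and at end of string.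
import Mathlib
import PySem

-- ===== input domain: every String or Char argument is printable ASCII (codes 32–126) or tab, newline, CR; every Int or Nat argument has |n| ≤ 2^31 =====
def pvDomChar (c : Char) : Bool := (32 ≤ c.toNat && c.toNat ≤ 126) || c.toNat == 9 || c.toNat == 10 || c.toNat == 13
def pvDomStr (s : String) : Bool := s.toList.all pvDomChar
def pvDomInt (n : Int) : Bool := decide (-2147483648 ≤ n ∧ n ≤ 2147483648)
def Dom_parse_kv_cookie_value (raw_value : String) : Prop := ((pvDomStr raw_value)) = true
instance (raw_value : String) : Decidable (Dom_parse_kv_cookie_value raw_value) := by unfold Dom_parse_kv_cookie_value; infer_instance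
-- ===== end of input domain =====

-- B replaces A's split-on-'&' / split-on-'=' / branch pipeline by a single left-to-right
-- character scan (a small state machine); same return value, alternative structure.

-- ===== PORT A =====
-- literal port of A: split on '&', skip items without '=', split each item at the first '=',
-- skip empty keys, assign into the dict (overwrite keeps position), return the dict.
def parse_kv_cookie_value (raw_value : String) : List (String × String) :=
  (((PySem.Chars.splitOn raw_value.toList ['&']).foldl
      (fun (result : PySem.Dict (List Char) (List Char)) item =>
        if PySem.Chars.isIn ['='] item = false then result
        else
          let parts := PySem.Chars.splitOnMax item ['='] 1
          let key := parts.headD []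
          let value := parts.tail.headD []
          if key ≠ [] then result.insert key value else result)
      PySem.Dict.empty).items).map (fun p => (String.ofList p.1, String.ofList p.2))

-- ===== PORT B =====
-- one step of B's character state machine (result dict, key so far, value so far, in_value flag)
def pvAltStep (st : PySem.Dict (List Char) (List Char) × List Char × List Char × Bool)
    (ch : Char) : PySem.Dict (List Char) (List Char) × List Char × List Char × Bool :=
  match st with
  | (result, key, val, inv) =>
    if ch = '&' then
      ((if inv = true ∧ key ≠ [] then result.insert key val else result), [], [], false)
    else if ch = '=' ∧ inv = false then (result, key, val, true)
    else if inv = true then (result, key, val ++ [ch], inv)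
    else (result, key ++ [ch], val, inv)

-- B's trailing flush: commit the last pair if a '=' was seen and the key is non-empty
def pvAltFlush (st : PySem.Dict (List Char) (List Char) × List Char × List Char × Bool) :
    PySem.Dict (List Char) (List Char) :=
  match st with
  | (result, key, val, inv) => if inv = true ∧ key ≠ [] then result.insert key val else result

def parse_kv_cookie_value_alt (raw_value : String) : List (String × String) :=
  ((pvAltFlush (raw_value.toList.foldl pvAltStep (PySem.Dict.empty, [], [], false))).items).map
    (fun p => (String.ofList p.1, String.ofList p.2))

-- ===== PRECONDITION & SPEC =====
def Spec_parse_kv_cookie_value (raw_value : String) (out : List (String × String)) : Prop := out = parse_kv_cookie_value_alt raw_value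
instance (raw_value : String) (out : List (String × String)) : Decidable (Spec_parse_kv_cookie_value raw_value out) := by unfold Spec_parse_kv_cookie_value; infer_instance

-- ===== CLAIM (what is proved, stated in full; the proofs are below) =====
def Claim_equal_parse_kv_cookie_value : Prop := ∀ (raw_value : String), Dom_parse_kv_cookie_value raw_value → Spec_parse_kv_cookie_value raw_value (parse_kv_cookie_value raw_value)

-- ===== LEMMAS AND PROOFS =====

-- A's item-processing step, named for the proofs (definitionally the lambda inside port A)
def pvStepA (result : PySem.Dict (List Char) (List Char)) (item : List Char) :
    PySem.Dict (List Char) (List Char) :=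
  if PySem.Chars.isIn ['='] item = false then result
  else
    let parts := PySem.Chars.splitOnMax item ['='] 1
    let key := parts.headD []
    let value := parts.tail.headD []
    if key ≠ [] then result.insert key value else result

-- fuel-free accumulator form of PySem.Chars.splitOn for a single-character separator
def sp1 (c : Char) : List Char → List Char → List (List Char)
  | [], cur => [cur.reverse]
  | ch :: rest, cur => if ch = c then cur.reverse :: sp1 c rest [] else sp1 c rest (ch :: cur)

theorem go_eq (c : Char) : ∀ (fuel : Nat) (l cur : List Char) (acc : List (List Char)),
    l.length < fuel →
    PySem.Chars.splitOn.go [c] fuel l cur acc = acc.reverse ++ sp1 c l cur := by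
  intro fuel
  induction fuel with
  | zero => intro l cur acc h; omega
  | succ f ih =>
    intro l cur acc h
    cases l with
    | nil => simp [PySem.Chars.splitOn.go, sp1]
    | cons ch rest =>
      rw [PySem.Chars.splitOn.go]
      by_cases hc : ch = c
      · subst hc
        simp [List.isPrefixOf, sp1,
          ih rest [] (cur.reverse :: acc) (by simpa using Nat.lt_of_succ_lt_succ h)]
      · simp [List.isPrefixOf, hc, Ne.symm hc, sp1,
          ih rest (ch :: cur) acc (by simpa using Nat.lt_of_succ_lt_succ h)]

theorem splitOn_eq_sp1 (c : Char) (l : List Char) :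
    PySem.Chars.splitOn l [c] = sp1 c l [] := by
  simpa using go_eq c (l.length + 1) l [] [] (by omega)

theorem goMax0 (fuel : Nat) (l cur : List Char) (acc : List (List Char)) :
    PySem.Chars.splitOnMax.go ['='] fuel 0 l cur acc = ((cur.reverse ++ l) :: acc).reverse := by
  cases fuel with
  | zero => rw [PySem.Chars.splitOnMax.go.eq_def]
  | succ f => cases l with
    | nil => rw [PySem.Chars.splitOnMax.go.eq_def]; simp
    | cons ch rest => rw [PySem.Chars.splitOnMax.go.eq_def]; simp

theorem goMax1 : ∀ (key : List Char) (fuel : Nat) (cur val : List Char) (acc : List (List Char)),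
    '=' ∉ key → key.length + val.length < fuel →
    PySem.Chars.splitOnMax.go ['='] fuel 1 (key ++ '=' :: val) cur acc =
      acc.reverse ++ [cur.reverse ++ key, val] := by
  intro key
  induction key with
  | nil =>
    intro fuel cur val acc _ h
    cases fuel with
    | zero => omega
    | succ f =>
      rw [PySem.Chars.splitOnMax.go.eq_def]
      simp [List.isPrefixOf, goMax0]
  | cons k ks ih =>
    intro fuel cur val acc hk h
    cases fuel with
    | zero => omega
    | succ f =>
      have hkne : ¬('=' = k) := by
        intro heq; exact hk (by simp [← heq])
      rw [PySem.Chars.splitOnMax.go.eq_def]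
      have hrec := ih f (k :: cur) val acc (fun hm => hk (List.mem_cons_of_mem _ hm))
        (by simp at h ⊢; omega)
      simp [List.isPrefixOf, hkne, hrec]

theorem splitOnMax_pair (key val : List Char) (hk : '=' ∉ key) :
    PySem.Chars.splitOnMax (key ++ '=' :: val) ['='] 1 = [key, val] := by
  rw [PySem.Chars.splitOnMax]
  simp only [show ¬((1:Int) < 0) by norm_num, if_false]
  simpa using goMax1 key ((key ++ '=' :: val).length + 1) [] val [] hk (by simp)

theorem isIn_singleton (c : Char) (l : List Char) :
    PySem.Chars.isIn [c] l = true ↔ c ∈ l := by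
  rw [PySem.Chars.isIn_iff_infix]
  constructor
  · intro h; simpa using h.sublist.subset (List.mem_singleton_self c)
  · intro h
    obtain ⟨s, t, rfl⟩ := List.append_of_mem h
    exact ⟨s, t, by simp⟩

-- A's step applied to the item B's state has accumulated
theorem stepA_recon (d : PySem.Dict (List Char) (List Char)) (key val : List Char)
    (inv : Bool) (hk : '=' ∉ key) :
    pvStepA d (if inv then key ++ '=' :: val else key) =
      (if inv = true ∧ key ≠ [] then d.insert key val else d) := by
  cases inv with
  | false =>
    have hno : PySem.Chars.isIn ['='] key = false :=
      Bool.eq_false_iff.mpr fun h => hk ((isIn_singleton _ _).mp h)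
    simp [pvStepA, hno]
  | true =>
    have hin : PySem.Chars.isIn ['='] (key ++ '=' :: val) = true :=
      (isIn_singleton _ _).mpr (by simp)
    simp [pvStepA, hin, splitOnMax_pair key val hk]

-- main invariant: B's scan from any consistent state equals A's fold over the remaining items
theorem scan_eq : ∀ (cs key val : List Char) (inv : Bool)
    (d : PySem.Dict (List Char) (List Char)),
    '=' ∉ key → '&' ∉ key → '&' ∉ val → (inv = false → val = []) →
    pvAltFlush (cs.foldl pvAltStep (d, key, val, inv)) =
      (sp1 '&' cs ((if inv then key ++ '=' :: val else key).reverse)).foldl pvStepA d := by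
  intro cs
  induction cs with
  | nil =>
    intro key val inv d hk hak hav hiv
    simp [pvAltFlush, sp1, stepA_recon d key val inv hk]
  | cons ch cs ih =>
    intro key val inv d hk hak hav hiv
    simp only [List.foldl_cons]
    by_cases hamp : ch = '&'
    · subst hamp
      have hstep : pvAltStep (d, key, val, inv) '&' =
          ((if inv = true ∧ key ≠ [] then d.insert key val else d), [], [], false) := by
        simp [pvAltStep]
      rw [hstep, ih [] [] false _ (by simp) (by simp) (by simp) (fun _ => rfl)]
      have hsp : sp1 '&' ('&' :: cs) ((if inv then key ++ '=' :: val else key).reverse) =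
          (if inv then key ++ '=' :: val else key) :: sp1 '&' cs [] := by simp [sp1]
      rw [hsp, List.foldl_cons, stepA_recon d key val inv hk]
      simp
    · by_cases heq : ch = '=' ∧ inv = false
      · obtain ⟨rfl, hinv⟩ := heq
        subst hinv
        have hv := hiv rfl; subst hv
        have hstep : pvAltStep (d, key, [], false) '=' = (d, key, [], true) := by
          simp [pvAltStep, hamp]
        rw [hstep, ih key [] true d hk hak (by simp) (by simp)]
        have hsp : sp1 '&' ('=' :: cs) ((if false then key ++ '=' :: [] else key).reverse) =
            sp1 '&' cs ('=' :: key.reverse) := by simp [sp1, hamp]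
        rw [hsp]
        simp
      · cases inv with
        | true =>
          have hstep : pvAltStep (d, key, val, true) ch = (d, key, val ++ [ch], true) := by
            simp [pvAltStep, hamp]
          rw [hstep, ih key (val ++ [ch]) true d hk hak
            (by intro hm; rcases List.mem_append.mp hm with h | h
                · exact hav h
                · simp at h; exact hamp h.symm) (by simp)]
          have hsp : sp1 '&' (ch :: cs) ((if true then key ++ '=' :: val else key).reverse) =
              sp1 '&' cs ((if true then key ++ '=' :: (val ++ [ch]) else key).reverse) := by
            simp [sp1, hamp]
          rw [hsp]
        | false =>
          have hch : ch ≠ '=' := fun h => heq ⟨h, rfl⟩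
          have hv := hiv rfl; subst hv
          have hstep : pvAltStep (d, key, [], false) ch = (d, key ++ [ch], [], false) := by
            simp [pvAltStep, hamp, hch]
          rw [hstep, ih (key ++ [ch]) [] false d
            (by intro hm; rcases List.mem_append.mp hm with h | h
                · exact hk h
                · simp at h; exact hch h.symm)
            (by intro hm; rcases List.mem_append.mp hm with h | h
                · exact hak h
                · simp at h; exact hamp h.symm)
            (by simp) (fun _ => rfl)]
          have hsp : sp1 '&' (ch :: cs) ((if false then key ++ '=' :: [] else key).reverse) =
              sp1 '&' cs ((if false then (key ++ [ch]) ++ '=' :: [] else key ++ [ch]).reverse) := by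
            simp [sp1, hamp]
          rw [hsp]

-- ===== VERDICT (by name: the statement is the Claim_ definition above) =====
theorem parse_kv_cookie_value_spec : Claim_equal_parse_kv_cookie_value := by
  intro raw_value _
  unfold Spec_parse_kv_cookie_value parse_kv_cookie_value parse_kv_cookie_value_alt
  rw [splitOn_eq_sp1]
  rw [scan_eq raw_value.toList [] [] false PySem.Dict.empty (by simp) (by simp) (by simp)
    (fun _ => rfl)]
  rfl
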